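-- pv_equiv track=rewrite | github.com/zmwong/IMC | 1.10/scripts/libs/components/distributions/abstract_distribution.py | expand_cmd_list
-- ===== SOURCE A (Python) =====
-- def expand_cmd_list(original_list, required_size):
--     """
--     Expands a list of commands to a specified size by reusing elements from the original list.
--
--     This method ensures that the resulting list has the required size by repeatedly
--     appending elements from the original list until the desired size is reached. If the
--     original list is already larger than or equal to the required size, it is returned as is.
--
--     Args:
--         original_list (list): The list of commands to be expanded.
--         required_size (int): The desired size of the expanded list.
--
--     Returns:
--         list: A list of commands expanded to the required size.
--
--     Raises:
--         ValueError: If the `original_list` is empty.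
--     """
--     if not original_list:
--         raise ValueError("The command list cannot be empty")
--
--     if len(original_list) >= required_size:
--         return original_list
--     expanded_list = []
--     while len(expanded_list) < required_size:
--         expanded_list.extend(original_list)
--
--     return expanded_list[:required_size]
-- ===== SOURCE B (Python) =====
-- def expand_cmd_list(original_list, required_size):
--     if not original_list:
--         raise ValueError("The command list cannot be empty")
--     n = len(original_list)
--     if n >= required_size:
--         return original_list
--     return [original_list[i % n] for i in range(required_size)]
-- ===== Notes on version B (the rewrite author's own statement) =====
-- stated objective: simpler
-- what changed: Replaces the while-extend-whole-copies-then-slice loop with a single comprehension that indexes the source modulo its length, building exactly required_size elements and nothing extra.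
import Mathlib
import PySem

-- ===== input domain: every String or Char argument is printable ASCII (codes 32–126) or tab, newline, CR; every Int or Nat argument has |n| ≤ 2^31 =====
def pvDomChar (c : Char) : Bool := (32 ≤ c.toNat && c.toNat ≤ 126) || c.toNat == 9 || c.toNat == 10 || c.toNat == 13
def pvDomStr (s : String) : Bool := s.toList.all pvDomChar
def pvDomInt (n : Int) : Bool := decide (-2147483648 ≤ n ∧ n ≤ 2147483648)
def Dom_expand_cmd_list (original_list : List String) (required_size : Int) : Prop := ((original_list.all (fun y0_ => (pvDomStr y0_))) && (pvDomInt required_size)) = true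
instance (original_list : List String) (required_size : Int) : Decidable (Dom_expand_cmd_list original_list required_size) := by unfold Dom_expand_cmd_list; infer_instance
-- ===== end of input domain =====

-- B replaces A's while-extend-then-slice loop by a modulo-indexing comprehension of exactly required_size elements (simpler, no overshoot).


-- ===== PORT A =====
-- the while-loop: each pass extends the accumulator by a whole copy of xs; fuel
-- (required_size.toNat passes suffice, each pass adds ≥ 1 element) only makes it total
def expandLoopA (xs : List String) (rs : Int) : Nat → List String → List String
  | 0, acc => acc
  | fuel + 1, acc =>
      if (acc.length : Int) < rs then expandLoopA xs rs fuel (acc ++ xs) else acc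

def expand_cmd_list (original_list : List String) (required_size : Int) : List String :=
  if original_list = [] then []   -- Python raises ValueError here; excluded by Pre_
  else if required_size ≤ (original_list.length : Int) then original_list
  else
    -- expanded_list[:required_size]: here required_size > len ≥ 1, so the slice is take
    (expandLoopA original_list required_size required_size.toNat []).take required_size.toNat

-- ===== PORT B =====
def expand_cmd_list_alt (original_list : List String) (required_size : Int) : List String :=
  if original_list = [] then []   -- Python raises ValueError here; excluded by Pre_
  else if (original_list.length : Int) ≥ required_size then original_list
  else
    (List.range required_size.toNat).map
      (fun i => original_list.getD (i % original_list.length) "")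

-- ===== PRECONDITION & SPEC =====
-- Pre_ excludes exactly the empty list, on which Python A raises ValueError.
def Pre_expand_cmd_list (original_list : List String) (required_size : Int) : Prop :=
  original_list ≠ []
instance (original_list : List String) (required_size : Int) : Decidable (Pre_expand_cmd_list original_list required_size) := by unfold Pre_expand_cmd_list; infer_instance

def pvWitness_expand_cmd_list : List String × Int := (["a", "b"], 5)

def Spec_expand_cmd_list (original_list : List String) (required_size : Int) (out : List String) : Prop := out = expand_cmd_list_alt original_list required_size
instance (original_list : List String) (required_size : Int) (out : List String) : Decidable (Spec_expand_cmd_list original_list required_size out) := by unfold Spec_expand_cmd_list; infer_instance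

-- ===== CLAIM (what is proved, stated in full; the proofs are below) =====
def Claim_equal_expand_cmd_list : Prop := ∀ (original_list : List String) (required_size : Int), Dom_expand_cmd_list original_list required_size → Pre_expand_cmd_list original_list required_size → Spec_expand_cmd_list original_list required_size (expand_cmd_list original_list required_size)

-- ===== LEMMAS AND PROOFS =====

lemma flat_replicate_length (xs : List String) (m : Nat) :
    ((List.replicate m xs).flatten).length = m * xs.length := by
  induction m with
  | zero => simp
  | succ k ih => simp [List.replicate_succ, ih, Nat.succ_mul]; ring

lemma flat_replicate_getD (xs : List String) (hx : xs ≠ []) (m i : Nat)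
    (h : i < m * xs.length) :
    ((List.replicate m xs).flatten).getD i "" = xs.getD (i % xs.length) "" := by
  induction m generalizing i with
  | zero => simp at h
  | succ k ih =>
    rw [List.replicate_succ, List.flatten_cons]
    by_cases hi : i < xs.length
    · rw [List.getD_append _ _ _ _ hi, Nat.mod_eq_of_lt hi]
    · push_neg at hi
      rw [List.getD_append_right _ _ _ _ hi, Nat.mod_eq_sub_mod hi]
      exact ih (i - xs.length) (by rw [Nat.succ_mul] at h; omega)

-- the loop invariant: starting from j whole copies, with enough fuel, the result is
-- some number m of whole copies whose total length reaches rs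
lemma expandLoopA_replicate (xs : List String) (rs : Int) (hx : xs ≠ []) :
    ∀ (fuel j : Nat), rs.toNat ≤ j * xs.length + fuel * xs.length →
    ∃ m, expandLoopA xs rs fuel ((List.replicate j xs).flatten) = (List.replicate m xs).flatten
      ∧ rs.toNat ≤ m * xs.length := by
  intro fuel
  induction fuel with
  | zero =>
    intro j hj
    exact ⟨j, rfl, by simpa using hj⟩
  | succ k ih =>
    intro j hj
    rw [expandLoopA]
    by_cases hlt : (((List.replicate j xs).flatten).length : Int) < rs
    · rw [if_pos hlt]
      have : (List.replicate j xs).flatten ++ xs = (List.replicate (j + 1) xs).flatten := by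
        simp [List.replicate_succ']
      rw [this]
      exact ih (j + 1) (by rw [Nat.succ_mul] at hj ⊢; omega)
    · rw [if_neg hlt]
      refine ⟨j, rfl, ?_⟩
      rw [flat_replicate_length] at hlt
      omega

lemma take_flat_replicate (xs : List String) (hx : xs ≠ []) (m k : Nat)
    (h : k ≤ m * xs.length) :
    ((List.replicate m xs).flatten).take k =
      (List.range k).map (fun i => xs.getD (i % xs.length) "") := by
  apply List.ext_getElem
  · simp [flat_replicate_length]; omega
  · intro i h1 h2
    have hik : i < k := by simpa using h2
    have hif : i < ((List.replicate m xs).flatten).length := by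
      rw [flat_replicate_length]; omega
    rw [List.getElem_take, List.getElem_map, List.getElem_range]
    rw [← List.getD_eq_getElem _ "" hif, flat_replicate_getD xs hx m i (by omega)]

-- ===== VERDICT (by name: the statement is the Claim_ definition above) =====
theorem expand_cmd_list_spec : Claim_equal_expand_cmd_list := by
  intro xs rs _ hpre
  have hne : xs ≠ [] := hpre
  unfold Spec_expand_cmd_list expand_cmd_list expand_cmd_list_alt
  rw [if_neg hne, if_neg hne]
  by_cases hle : rs ≤ (xs.length : Int)
  · rw [if_pos hle, if_pos hle]
  · rw [if_neg hle, if_neg hle]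
    push_neg at hle
    have hx1 : 1 ≤ xs.length := List.length_pos_iff.mpr hne
    obtain ⟨m, hm, hmlen⟩ := expandLoopA_replicate xs rs hne rs.toNat 0
      (by rw [Nat.zero_mul, Nat.zero_add]; exact Nat.le_mul_of_pos_right _ hx1)
    have h0 : ((List.replicate 0 xs).flatten : List String) = [] := by simp
    rw [← h0, hm]
    exact take_flat_replicate xs hne m rs.toNat hmlen
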